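-- pv_equiv track=rewrite | github.com/chien-wei/LeetCode | 0908_Smallest_Range_I.py | smallestRangeI
-- ===== SOURCE A (Python) =====
-- def smallestRangeI(A, K):
--     """
--     :type A: List[int]
--     :type K: int
--     :rtype: int
--     """
--     s = A[0] + K
--     l = A[0] - K
--     for i in range(1, len(A)):
--         s = min(A[i] + K, s)
--         l = max(A[i] - K, l)
--     if s >= l:
--         return 0
--     return l-s
-- ===== SOURCE B (Python) =====
-- def smallestRangeI(A, K):
--     s = sorted(A)
--     return max(0, s[-1] - s[0] - 2 * K)
-- ===== Notes on version B (the rewrite author's own statement) =====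
-- stated objective: alternative
-- what changed: Replaces the single-pass loop maintaining two running accumulators (min+K, max-K) by sorting the list once and reading the extremes off the sorted endpoints, returning max(0, s[-1]-s[0]-2*K).
import Mathlib
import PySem

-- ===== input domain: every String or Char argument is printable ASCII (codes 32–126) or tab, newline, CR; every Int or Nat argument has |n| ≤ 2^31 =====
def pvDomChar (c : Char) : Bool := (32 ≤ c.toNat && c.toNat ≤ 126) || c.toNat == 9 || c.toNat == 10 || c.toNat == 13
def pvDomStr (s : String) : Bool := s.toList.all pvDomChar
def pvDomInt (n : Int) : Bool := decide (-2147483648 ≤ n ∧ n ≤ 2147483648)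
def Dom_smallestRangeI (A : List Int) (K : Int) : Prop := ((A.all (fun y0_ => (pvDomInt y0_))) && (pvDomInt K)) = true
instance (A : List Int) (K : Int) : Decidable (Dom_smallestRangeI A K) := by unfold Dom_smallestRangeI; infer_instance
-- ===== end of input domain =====

-- B replaces A's single-pass accumulator loop by sort-then-endpoints:
-- s = sorted(A); answer = max(0, s[-1] - s[0] - 2*K).  Equal on every nonempty list.

-- ===== PORT A =====
-- A: s = A[0]+K, l = A[0]-K, then a loop over the remaining elements updating both,
-- then 'if s >= l: return 0 else return l-s'.  The [] case is only a totality guard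
-- (Python raises IndexError there; excluded by Pre_).
def smallestRangeI (A : List Int) (K : Int) : Int :=
  match A with
  | [] => 0
  | a :: t =>
    let p := t.foldl (fun (p : Int × Int) x => (min (x + K) p.1, max (x - K) p.2)) (a + K, a - K)
    if p.1 ≥ p.2 then 0 else p.2 - p.1

-- ===== PORT B =====
-- B: s = sorted(A); max(0, s[-1] - s[0] - 2*K).  The none branch is only a totality
-- guard (Python's s[-1]/s[0] raise IndexError on []; excluded by Pre_).
def smallestRangeI_alt (A : List Int) (K : Int) : Int :=
  let s := PySem.List.sorted A (fun x => x) false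
  match PySem.List.pyGet? s (-1), PySem.List.pyGet? s 0 with
  | some hi, some lo => max 0 (hi - lo - 2 * K)
  | _, _ => 0

-- ===== PRECONDITION & SPEC =====
-- Pre_ excludes only the empty list, on which A raises IndexError (and B's s[-1] raises IndexError too).
def Pre_smallestRangeI (A : List Int) (_K : Int) : Prop := A ≠ []
instance (A : List Int) (K : Int) : Decidable (Pre_smallestRangeI A K) := by unfold Pre_smallestRangeI; infer_instance
def pvWitness_smallestRangeI : List Int × Int := ([1, 3, 6], 3)
def Spec_smallestRangeI (A : List Int) (K : Int) (out : Int) : Prop := out = smallestRangeI_alt A K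
instance (A : List Int) (K : Int) (out : Int) : Decidable (Spec_smallestRangeI A K out) := by unfold Spec_smallestRangeI; infer_instance

-- ===== CLAIM (what is proved, stated in full; the proofs are below) =====
def Claim_equal_smallestRangeI : Prop := ∀ (A : List Int) (K : Int), Dom_smallestRangeI A K → Pre_smallestRangeI A K → Spec_smallestRangeI A K (smallestRangeI A K)

-- ===== LEMMAS AND PROOFS =====

/-- A's paired accumulator loop computes (running min + K, running max - K). -/
theorem foldl_pair_minmax (K : Int) (t : List Int) : ∀ (s l : Int),
    t.foldl (fun (p : Int × Int) x => (min (x + K) p.1, max (x - K) p.2)) (s + K, l - K)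
      = (t.foldl min s + K, t.foldl max l - K) := by
  induction t with
  | nil => intro s l; simp
  | cons x t ih =>
    intro s l
    have h1 : min (x + K) (s + K) = min x s + K := by omega
    have h2 : max (x - K) (l - K) = max x l - K := by omega
    simp only [List.foldl_cons, h1, h2]
    rw [min_comm x s, max_comm x l] at *
    exact ih (min s x) (max l x)

theorem foldl_min_mem (t : List Int) : ∀ a : Int, t.foldl min a ∈ a :: t := by
  induction t with
  | nil => intro a; simp
  | cons x t ih =>
    intro a
    simp only [List.foldl_cons]
    rcases List.mem_cons.mp (ih (min a x)) with h | h
    · rcases le_total a x with hle | hle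
      · rw [min_eq_left hle] at *; rw [h]; exact List.mem_cons_self
      · rw [min_eq_right hle] at *; rw [h]
        exact List.mem_cons.mpr (Or.inr List.mem_cons_self)
    · exact List.mem_cons.mpr (Or.inr (List.mem_cons.mpr (Or.inr h)))

theorem foldl_min_le (t : List Int) : ∀ a : Int, ∀ y ∈ a :: t, t.foldl min a ≤ y := by
  induction t with
  | nil =>
    intro a y hy
    simp only [List.mem_singleton] at hy
    simp [hy]
  | cons x t ih =>
    intro a y hy
    simp only [List.foldl_cons]
    have h := ih (min a x)
    simp only [List.mem_cons] at hy
    rcases hy with rfl | rfl | hy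
    · have := h (min y x) List.mem_cons_self; omega
    · have := h (min a y) List.mem_cons_self; omega
    · exact h y (List.mem_cons.mpr (Or.inr hy))

theorem foldl_max_mem (t : List Int) : ∀ a : Int, t.foldl max a ∈ a :: t := by
  induction t with
  | nil => intro a; simp
  | cons x t ih =>
    intro a
    simp only [List.foldl_cons]
    rcases List.mem_cons.mp (ih (max a x)) with h | h
    · rcases le_total a x with hle | hle
      · rw [max_eq_right hle] at *; rw [h]
        exact List.mem_cons.mpr (Or.inr List.mem_cons_self)
      · rw [max_eq_left hle] at *; rw [h]; exact List.mem_cons_self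
    · exact List.mem_cons.mpr (Or.inr (List.mem_cons.mpr (Or.inr h)))

theorem foldl_max_ge (t : List Int) : ∀ a : Int, ∀ y ∈ a :: t, y ≤ t.foldl max a := by
  induction t with
  | nil =>
    intro a y hy
    simp only [List.mem_singleton] at hy
    simp [hy]
  | cons x t ih =>
    intro a y hy
    simp only [List.foldl_cons]
    have h := ih (max a x)
    simp only [List.mem_cons] at hy
    rcases hy with rfl | rfl | hy
    · have := h (max y x) List.mem_cons_self; omega
    · have := h (max a y) List.mem_cons_self; omega
    · exact h y (List.mem_cons.mpr (Or.inr hy))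

-- ===== VERDICT =====
theorem smallestRangeI_spec : Claim_equal_smallestRangeI := by
  intro A K _ hpre
  unfold Spec_smallestRangeI smallestRangeI smallestRangeI_alt
  match A with
  | [] => exact absurd rfl hpre
  | a :: t =>
    -- the sorted list is nonempty
    have hsne : PySem.List.sorted (a :: t) (fun x => x) false ≠ [] := by
      intro h
      have := (PySem.List.sorted_eq_nil_iff (xs := a :: t) (key := fun x => x) (rev := false)).mp h
      simp at this
    obtain ⟨m, s, hs⟩ := List.exists_cons_of_ne_nil hsne
    -- head and last of the sorted list
    have hperm : (PySem.List.sorted (a :: t) (fun x => x) false).Perm (a :: t) :=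
      PySem.List.sorted_perm _ _ _
    rw [hs] at hperm
    have hlastmem : (m :: s).getLast (by simp) ∈ a :: t :=
      hperm.subset (List.getLast_mem _)
    have hheadmem : m ∈ a :: t := hperm.subset (by simp)
    have hheadle : ∀ y ∈ a :: t, m ≤ y := by
      intro y hy
      exact PySem.List.key_head_sorted_le _ _ hs y hy
    -- every element of the sorted list is ≤ its last element
    have hlastge : ∀ y ∈ a :: t, y ≤ (m :: s).getLast (by simp) := by
      intro y hy
      have hy' : y ∈ m :: s := hperm.mem_iff.mpr hy
      obtain ⟨i, hi, hiy⟩ := List.mem_iff_getElem.mp hy'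
      have hmono := PySem.List.key_sorted_getElem_mono (xs := a :: t) (key := fun x => x)
        (p := i) (q := (PySem.List.sorted (a :: t) (fun x => x) false).length - 1)
        (by rw [hs]; simp at hi ⊢; omega) (by rw [hs]; simp)
      rw [List.getLast_eq_getElem]
      simp only [hs] at hmono
      simpa [hiy] using hmono
    -- reduce both matches
    dsimp only
    -- A's loop result
    rw [foldl_pair_minmax K t a a]
    -- B's lookups
    rw [hs, PySem.List.pyGet?_neg_one, PySem.List.pyGet?_zero_cons]
    have hlget : (m :: s).getLast? = some ((m :: s).getLast (by simp)) := by
      simp [List.getLast?_eq_some_getLast]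
    rw [hlget]
    -- identify foldl min / foldl max with head / last of sorted
    have hmin : t.foldl min a = m :=
      le_antisymm (foldl_min_le t a m hheadmem) (hheadle _ (foldl_min_mem t a))
    have hmax : t.foldl max a = (m :: s).getLast (by simp) :=
      le_antisymm (hlastge _ (foldl_max_mem t a)) (foldl_max_ge t a _ hlastmem)
    rw [hmin, hmax]
    split_ifs with h <;> simp <;> omega
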